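-- pv_equiv track=rewrite | github.com/leehalevi/python-course-assignments | day05/dna_sequencing.py | sequence_seperating
-- ===== SOURCE A (Python) =====
-- def sequence_seperating(sequence):
--     final_list = []
--     i = 0
--
--     for idx in range(len(sequence)):
--         nucleotide = sequence[i]
--
--         if nucleotide not in "ACGT":
--             string = sequence[:i]
--             sequence = sequence[i + 1:]  # Remove the invalid nucleotide
--             final_list.append(string)
--             i = -1
--
--         i += 1
--
--     final_list.append(sequence)
--     final_list.sort(key=len, reverse = True)
--     final_list = [s for s in final_list if s]
--
--     return final_list
-- ===== SOURCE B (Python) =====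
-- def sequence_seperating(sequence):
--     fragments = []
--     current = []
--     for ch in sequence:
--         if ch in "ACGT":
--             current.append(ch)
--         else:
--             if current:
--                 fragments.append("".join(current))
--                 current = []
--     if current:
--         fragments.append("".join(current))
--     fragments.sort(key=len, reverse=True)
--     return fragments
-- ===== Notes on version B (the rewrite author's own statement) =====
-- stated objective: faster
-- what changed: single left-to-right pass collecting maximal ACGT runs into a list (no repeated slicing/copying of the remaining string), then one stable sort by length descending
import Mathlib
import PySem

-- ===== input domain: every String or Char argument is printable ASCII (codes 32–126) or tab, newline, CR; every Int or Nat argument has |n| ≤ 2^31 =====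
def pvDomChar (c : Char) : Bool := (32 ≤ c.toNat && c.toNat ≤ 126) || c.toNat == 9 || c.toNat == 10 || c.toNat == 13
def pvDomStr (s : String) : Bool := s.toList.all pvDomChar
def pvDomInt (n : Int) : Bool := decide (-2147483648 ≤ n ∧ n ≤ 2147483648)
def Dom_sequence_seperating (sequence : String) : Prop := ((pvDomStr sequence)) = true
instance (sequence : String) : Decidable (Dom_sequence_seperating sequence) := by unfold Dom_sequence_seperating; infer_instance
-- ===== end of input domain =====

-- B replaces A's repeated slice-and-restart scan by a single pass that collects maximal ACGT
-- runs, then one stable sort by length descending (objective: faster; measured by the check).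


-- ===== PORT A =====
-- `nucleotide in "ACGT"` (shared by both Pythons)
def pvIsACGT (c : Char) : Bool := "ACGT".toList.contains c

-- A's for-loop over range(len(sequence)): state (final_list, i, sequence); fuel = the fixed
-- iteration count.  `i = -1; i += 1` is transliterated as the new pointer 0.
def pvLoopA : List (List Char) → Int → List Char → Nat → (List (List Char) × List Char)
  | fl, _, s, 0 => (fl, s)
  | fl, i, s, fuel+1 =>
    match PySem.List.pyGet? s i with
    | none => (fl, s)   -- Python would raise IndexError here; never reached (i stays in range)
    | some c =>
      if pvIsACGT c then
        pvLoopA fl (i+1) s fuel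
      else
        pvLoopA (fl ++ [PySem.List.slice s none (some i)]) 0
                (PySem.List.slice s (some (i+1)) none) fuel

def sequence_seperating (sequence : String) : List String :=
  let s := sequence.toList
  let r := pvLoopA [] 0 s s.length
  let fl := r.1 ++ [r.2]                                      -- final_list.append(sequence)
  let fl := PySem.List.sorted fl (fun t => t.length) true     -- sort(key=len, reverse=True)
  (fl.filter fun t => !t.isEmpty).map (fun t => String.ofList t)  -- [s for s in final_list if s]

-- ===== PORT B =====
-- Source B's single pass: state (fragments, current)
def pvLoopB : List (List Char) → List Char → List Char → (List (List Char) × List Char)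
  | frags, cur, [] => (frags, cur)
  | frags, cur, c :: rest =>
    if pvIsACGT c then pvLoopB frags (cur ++ [c]) rest
    else if !cur.isEmpty then pvLoopB (frags ++ [cur]) [] rest
    else pvLoopB frags cur rest

def sequence_seperating_alt (sequence : String) : List String :=
  let r := pvLoopB [] [] sequence.toList
  let frags := if !r.2.isEmpty then r.1 ++ [r.2] else r.1     -- flush the last run
  (PySem.List.sorted frags (fun t => t.length) true).map (fun t => String.ofList t)

-- ===== PRECONDITION & SPEC =====
def Spec_sequence_seperating (sequence : String) (out : List String) : Prop := out = sequence_seperating_alt sequence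
instance (sequence : String) (out : List String) : Decidable (Spec_sequence_seperating sequence out) := by unfold Spec_sequence_seperating; infer_instance

-- ===== CLAIM (what is proved, stated in full; the proofs are below) =====
def Claim_equal_sequence_seperating : Prop := ∀ (sequence : String), Dom_sequence_seperating sequence → Spec_sequence_seperating sequence (sequence_seperating sequence)

-- ===== LEMMAS AND PROOFS =====
-- The common reference: split the character list at every non-ACGT character, keeping empties.
def pvSplit : List Char → List (List Char)
  | [] => [[]]
  | c :: cs => if pvIsACGT c then (pvSplit cs).modifyHead (fun t => c :: t) else [] :: pvSplit cs

theorem pvSplit_ne_nil (cs : List Char) : pvSplit cs ≠ [] := by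
  cases cs with
  | nil => simp [pvSplit]
  | cons c cs =>
    simp only [pvSplit]
    split
    · cases h : pvSplit cs with
      | nil => exact absurd h (pvSplit_ne_nil cs)
      | cons hd tl => simp
    · simp

-- A's loop computes the split: entering with s = pre ++ rest, i = pre.length and fuel = rest.length
theorem pvLoopA_split (rest pre : List Char) (fl : List (List Char)) :
    (pvLoopA fl (pre.length : Int) (pre ++ rest) rest.length).1 ++
      [(pvLoopA fl (pre.length : Int) (pre ++ rest) rest.length).2] =
    fl ++ (pvSplit rest).modifyHead (fun t => pre ++ t) := by
  induction rest generalizing pre fl with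
  | nil =>
    simp [pvLoopA, pvSplit]
  | cons c rest ih =>
    simp only [List.length_cons, pvLoopA, PySem.List.pyGet?_append_length]
    by_cases hc : pvIsACGT c
    · -- valid nucleotide: i += 1
      have h1 : (pre.length : Int) + 1 = ((pre ++ [c]).length : Int) := by
        simp
      have h2 : pre ++ c :: rest = (pre ++ [c]) ++ rest := by simp
      rw [hc, if_pos rfl, h1, h2, ih (pre ++ [c]) fl]
      obtain ⟨hd, tl, hsp⟩ : ∃ hd tl, pvSplit rest = hd :: tl := by
        cases h : pvSplit rest with
        | nil => exact absurd h (pvSplit_ne_nil rest)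
        | cons hd tl => exact ⟨hd, tl, rfl⟩
      simp [pvSplit, hc, hsp]
    · -- invalid: split off sequence[:i], continue on sequence[i+1:] with i = 0
      have hslice1 : PySem.List.slice (pre ++ c :: rest) none (some (pre.length : Int)) = pre := by
        rw [PySem.List.slice_to_natCast]
        exact List.take_left
      have hslice2 : PySem.List.slice (pre ++ c :: rest) (some ((pre.length : Int) + 1)) none = rest := by
        have : (pre.length : Int) + 1 = (((pre ++ [c]).length : Nat) : Int) := by simp
        rw [this, PySem.List.slice_from_natCast]
        have : pre ++ c :: rest = (pre ++ [c]) ++ rest := by simp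
        rw [this, List.drop_left]
      rw [if_neg (by simp [hc]), hslice1, hslice2]
      have hh := ih [] (fl ++ [pre])
      simp only [List.nil_append, List.length_nil, Nat.cast_zero] at hh
      rw [hh]
      simp only [pvSplit, hc, if_neg, Bool.false_eq_true, not_false_eq_true]
      cases pvSplit rest <;> simp [List.modifyHead]

theorem pvModifyHead_id {α : Type} (l : List α) : List.modifyHead (fun t => t) l = l := by
  cases l <;> simp [List.modifyHead]

-- B's loop computes the nonempty pieces of the split
theorem pvLoopB_split (rest cur : List Char) (frags : List (List Char)) :
    (if !(pvLoopB frags cur rest).2.isEmpty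
       then (pvLoopB frags cur rest).1 ++ [(pvLoopB frags cur rest).2]
       else (pvLoopB frags cur rest).1) =
    frags ++ (((pvSplit rest).modifyHead (fun t => cur ++ t)).filter fun t => !t.isEmpty) := by
  induction rest generalizing cur frags with
  | nil =>
    by_cases hcur : cur.isEmpty
    · simp [pvLoopB, pvSplit, List.isEmpty_iff.mp hcur]
    · simp [pvLoopB, pvSplit, hcur]
  | cons c rest ih =>
    obtain ⟨hd, tl, hsp⟩ : ∃ hd tl, pvSplit rest = hd :: tl := by
      cases h : pvSplit rest with
      | nil => exact absurd h (pvSplit_ne_nil rest)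
      | cons hd tl => exact ⟨hd, tl, rfl⟩
    by_cases hc : pvIsACGT c
    · simp only [pvLoopB, hc, reduceIte]
      rw [ih (cur ++ [c]) frags]
      simp [pvSplit, hc, hsp]
    · by_cases hcur : cur.isEmpty
      · simp only [pvLoopB, hc, hcur, Bool.not_true, Bool.false_eq_true, reduceIte]
        rw [ih cur frags]
        simp [pvSplit, hc, List.isEmpty_iff.mp hcur, pvModifyHead_id]
      · have hcur' : (!cur.isEmpty) = true := by simp [hcur]
        simp only [pvLoopB, hc, Bool.false_eq_true, reduceIte, hcur']
        rw [ih [] (frags ++ [cur])]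
        simp [pvSplit, hc, hcur, pvModifyHead_id]

-- stable insertion of a key-0 element goes to the very end
theorem pvInsert_empty (x : List Char) (hx : x.isEmpty) (acc : List (List Char)) :
    PySem.List.insertBy (fun a b => decide (b.length < a.length)) x acc = acc ++ [x] := by
  have hx' : x = [] := List.isEmpty_iff.mp hx
  subst hx'
  induction acc with
  | nil => simp [PySem.List.insertBy]
  | cons y ys ih => simp [PySem.List.insertBy, ih]

-- filtering the empties commutes with inserting a nonempty element into a desc-sorted list
theorem pvFilter_insert (x : List Char) (hx : ¬ x.isEmpty = true) (acc : List (List Char))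
    (hacc : acc.Pairwise (fun a b => b.length ≤ a.length)) :
    (PySem.List.insertBy (fun a b => decide (b.length < a.length)) x acc).filter (fun t => !t.isEmpty) =
    PySem.List.insertBy (fun a b => decide (b.length < a.length)) x
      (acc.filter (fun t => !t.isEmpty)) := by
  have hxlen : 0 < x.length := by
    cases x with
    | nil => simp at hx
    | cons a as => simp
  induction acc with
  | nil => simp [PySem.List.insertBy, hx]
  | cons y ys ih =>
    by_cases hb : (y.length < x.length)
    · simp only [PySem.List.insertBy, hb, decide_true]
      by_cases hy : y.isEmpty
      · -- y is empty, hence (by sortedness) so is all of ys: the filtered tail is empty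
        have hy0 : y.length = 0 := by simp [List.isEmpty_iff.mp hy]
        have htl : ys.filter (fun t => !t.isEmpty) = [] := by
          rw [List.filter_eq_nil_iff]
          intro z hz
          have : z.length ≤ y.length := (List.pairwise_cons.mp hacc).1 z hz
          have : z = [] := by
            cases z with
            | nil => rfl
            | cons b bs => simp [hy0] at this
          simp [this]
        simp [hx, hy, htl, PySem.List.insertBy]
      · simp [hx, hy, PySem.List.insertBy, hb]
    · have hyne : ¬ y.isEmpty = true := by
        intro h
        have : y.length = 0 := by simp [List.isEmpty_iff.mp h]
        omega
      simp only [PySem.List.insertBy, hb, decide_false, Bool.false_eq_true, if_false]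
      rw [List.filter_cons_of_pos (by simp [hyne]), ih (List.Pairwise.of_cons hacc)]
      simp [PySem.List.insertBy, hb, hyne]

theorem pvSorted_concat (xs : List (List Char)) (x : List Char) :
    PySem.List.sorted (xs ++ [x]) (fun t => t.length) true =
    PySem.List.insertBy (fun a b => decide (b.length < a.length)) x
      (PySem.List.sorted xs (fun t => t.length) true) := by
  simp [PySem.List.sorted, List.foldl_append]

-- filtering empties commutes with the length-descending stable sort
theorem pvFilter_sorted (xs : List (List Char)) :
    (PySem.List.sorted xs (fun t => t.length) true).filter (fun t => !t.isEmpty) =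
    PySem.List.sorted (xs.filter fun t => !t.isEmpty) (fun t => t.length) true := by
  induction xs using List.reverseRecOn with
  | nil => simp [PySem.List.sorted]
  | append_singleton xs x ih =>
    rw [pvSorted_concat, List.filter_append]
    by_cases hx : x.isEmpty
    · rw [pvInsert_empty x hx, List.filter_append]
      simp [hx, ih]
    · rw [pvFilter_insert x hx _ (PySem.List.sorted_pairwise_rev xs (fun t => t.length)), ih]
      simp [hx, pvSorted_concat]

-- ===== VERDICT (by name: the statement is the Claim_ definition above) =====
theorem sequence_seperating_spec : Claim_equal_sequence_seperating := by
  intro s _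
  unfold Spec_sequence_seperating sequence_seperating sequence_seperating_alt
  have hA := pvLoopA_split s.toList [] []
  simp only [List.nil_append, List.length_nil, Nat.cast_zero, pvModifyHead_id] at hA
  have hB := pvLoopB_split s.toList [] []
  simp only [List.nil_append, pvModifyHead_id] at hB
  simp only [hA, hB, pvFilter_sorted]
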